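-- pv_equiv track=rewrite | github.com/jrseti/stats_stuff | teams.py | name_to_num
-- ===== SOURCE A (Python) =====
-- names = [
-- 	    ["ATL","ATLANTA","Atl."],
-- 	    ["IND","INDIANAPOLIS","Ind."],
-- 	    ["BUF","BUFFALO","Buff","Buff."],
-- 	    ["CHI","CHICAGO","Chi","Chi."],
-- 	    ["CIN","CINCINNATI","Cin."],
-- 	    ["BAL","BALTIMORE","Balt","Balt.","Bal"],
-- 	    ["DAL","DALLAS","Dall","Dal."],
-- 	    ["DEN","DENVER","Denv","Den.","Denv."],
-- 	    ["DET","DETROIT","Det."],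
-- 	    ["GB","GREEN BAY","G.B."],
-- 	    ["TEN","TENNESSEE","Tenn."],
-- 	    ["KC","KANSAS CITY","K.C."],
-- 	    #["LA","L. A. RAMS","L.A.","LA-R"],
-- 	    ["LAR","L. A. RAMS","L.A.","LA-R","RAM"],
-- 	    ["MIA","MIAMI","Mia.","MIA.","mia."],
-- 	    ["MIN","MINNESOTA","Minn","Minn."],
-- 	    ["NE","NEW ENGLAND","NEW ENGL","N.E."],
-- 	    ["NO","NEW ORLEANS","N.O."],
-- 	    ["NYG","N.Y. GIANTS","NY-G","NYG","New York Giants"],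
-- 	    ["NYJ","N.Y. JETS","NY-J","NYJ","New York Jets"],
-- 	    #["OAK","OAKLAND","Raiders","Rai.","oak."],
-- 	    ["LVR","LAS VEGAS","Raiders","Rai.","oak."],
-- 	    ["PHI","PHILADELPHIA","Phil","Phi.","Phil."],
-- 	    ["PIT","PITTSBURGH","Pitt","Pitt."],
-- 	    ["ARI","ARIZONA","Phoenix","Pho.","ari.","ariz","Ariz."],
-- 	    ["LAC","L.A. CHARGERS","L A CHARGERS","LAC","LA-C","LA Chargers","L A Chargers"],
-- 	    ["SF","S. FRANCISCO","S.F."],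
-- 	    ["SEA","SEATTLE","Sea."],
-- 	    ["TB","TAMPA BAY","T.B."],
-- 	    ["WAS","WASHINGTON","Wash","Wash."],
-- 	    ["CAR","CAROLINA","car."],
-- 	    ["JAC","JACKSONVILLE","Jac","Jax"],
-- 	    ["CLE","CLEVELAND","Clev.","Clev","Clv"],
-- 	    ["HOU","HOUSTON","Hou","Hou."],
-- 	    ["All","NFL/","NFL","NFL/Avg"],
-- 	    ["BYE","BYE","Bye","Bye."]
-- 	]
--
-- def name_to_num(name):
-- 	index = 0
-- 	for name_list in names:
-- 		index += 1
-- 		if(name.upper() in [n.upper() for n in name_list]):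
-- 					if index == 34: # BYE team is 0
-- 						index = 0
-- 					return index
-- 	return -1
-- ===== SOURCE B (Python) =====
-- # Flat precomputed lookup table: alias (uppercased) -> team number.
-- # First occurrence wins; the BYE row (34th) maps to 0; unknown names -> -1.
-- _TEAM_NUM = {
--     "ATL": 1, "ATLANTA": 1, "ATL.": 1, "IND": 2, "INDIANAPOLIS": 2, "IND.": 2, "BUF": 3,
--     "BUFFALO": 3, "BUFF": 3, "BUFF.": 3, "CHI": 4, "CHICAGO": 4, "CHI.": 4, "CIN": 5,
--     "CINCINNATI": 5, "CIN.": 5, "BAL": 6, "BALTIMORE": 6, "BALT": 6, "BALT.": 6, "DAL": 7,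
--     "DALLAS": 7, "DALL": 7, "DAL.": 7, "DEN": 8, "DENVER": 8, "DENV": 8, "DEN.": 8, "DENV.": 8,
--     "DET": 9, "DETROIT": 9, "DET.": 9, "GB": 10, "GREEN BAY": 10, "G.B.": 10, "TEN": 11,
--     "TENNESSEE": 11, "TENN.": 11, "KC": 12, "KANSAS CITY": 12, "K.C.": 12, "LAR": 13,
--     "L. A. RAMS": 13, "L.A.": 13, "LA-R": 13, "RAM": 13, "MIA": 14, "MIAMI": 14, "MIA.": 14,
--     "MIN": 15, "MINNESOTA": 15, "MINN": 15, "MINN.": 15, "NE": 16, "NEW ENGLAND": 16,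
--     "NEW ENGL": 16, "N.E.": 16, "NO": 17, "NEW ORLEANS": 17, "N.O.": 17, "NYG": 18,
--     "N.Y. GIANTS": 18, "NY-G": 18, "NEW YORK GIANTS": 18, "NYJ": 19, "N.Y. JETS": 19,
--     "NY-J": 19, "NEW YORK JETS": 19, "LVR": 20, "LAS VEGAS": 20, "RAIDERS": 20, "RAI.": 20,
--     "OAK.": 20, "PHI": 21, "PHILADELPHIA": 21, "PHIL": 21, "PHI.": 21, "PHIL.": 21, "PIT": 22,
--     "PITTSBURGH": 22, "PITT": 22, "PITT.": 22, "ARI": 23, "ARIZONA": 23, "PHOENIX": 23,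
--     "PHO.": 23, "ARI.": 23, "ARIZ": 23, "ARIZ.": 23, "LAC": 24, "L.A. CHARGERS": 24,
--     "L A CHARGERS": 24, "LA-C": 24, "LA CHARGERS": 24, "SF": 25, "S. FRANCISCO": 25,
--     "S.F.": 25, "SEA": 26, "SEATTLE": 26, "SEA.": 26, "TB": 27, "TAMPA BAY": 27, "T.B.": 27,
--     "WAS": 28, "WASHINGTON": 28, "WASH": 28, "WASH.": 28, "CAR": 29, "CAROLINA": 29,
--     "CAR.": 29, "JAC": 30, "JACKSONVILLE": 30, "JAX": 30, "CLE": 31, "CLEVELAND": 31,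
--     "CLEV.": 31, "CLEV": 31, "CLV": 31, "HOU": 32, "HOUSTON": 32, "HOU.": 32, "ALL": 33,
--     "NFL/": 33, "NFL": 33, "NFL/AVG": 33, "BYE": 0, "BYE.": 0,
-- }
--
-- def name_to_num(name):
--     return _TEAM_NUM.get(name.upper(), -1)
-- ===== Notes on version B (the rewrite author's own statement) =====
-- stated objective: faster
-- what changed: Replaces the per-call scan over the nested rows (re-uppercasing every alias each call) with a flat module-level dict literal mapping each uppercased alias to its team number (first occurrence wins, BYE row 34 -> 0); the function body is a single dict .get with default -1.
import Mathlib
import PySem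

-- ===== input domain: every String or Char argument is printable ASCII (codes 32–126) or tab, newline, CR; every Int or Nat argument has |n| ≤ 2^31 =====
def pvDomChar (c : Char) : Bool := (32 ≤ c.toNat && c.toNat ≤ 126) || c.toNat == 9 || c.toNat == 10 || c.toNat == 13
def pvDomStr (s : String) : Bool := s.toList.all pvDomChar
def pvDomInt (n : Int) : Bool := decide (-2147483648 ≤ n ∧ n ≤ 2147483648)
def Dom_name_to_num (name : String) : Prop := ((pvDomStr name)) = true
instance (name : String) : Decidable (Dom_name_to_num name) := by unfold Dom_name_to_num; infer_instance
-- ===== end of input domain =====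

-- B replaces A's per-call loop over the nested alias table (re-uppercasing every alias on
-- every call) with a flat precomputed alias->number dict and a single .get: objective "faster".

-- ===== PORT A =====
-- the module-level table `names` used by A
def namesTable : List (List String) := [
  ["ATL","ATLANTA","Atl."],
  ["IND","INDIANAPOLIS","Ind."],
  ["BUF","BUFFALO","Buff","Buff."],
  ["CHI","CHICAGO","Chi","Chi."],
  ["CIN","CINCINNATI","Cin."],
  ["BAL","BALTIMORE","Balt","Balt.","Bal"],
  ["DAL","DALLAS","Dall","Dal."],
  ["DEN","DENVER","Denv","Den.","Denv."],
  ["DET","DETROIT","Det."],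
  ["GB","GREEN BAY","G.B."],
  ["TEN","TENNESSEE","Tenn."],
  ["KC","KANSAS CITY","K.C."],
  ["LAR","L. A. RAMS","L.A.","LA-R","RAM"],
  ["MIA","MIAMI","Mia.","MIA.","mia."],
  ["MIN","MINNESOTA","Minn","Minn."],
  ["NE","NEW ENGLAND","NEW ENGL","N.E."],
  ["NO","NEW ORLEANS","N.O."],
  ["NYG","N.Y. GIANTS","NY-G","NYG","New York Giants"],
  ["NYJ","N.Y. JETS","NY-J","NYJ","New York Jets"],
  ["LVR","LAS VEGAS","Raiders","Rai.","oak."],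
  ["PHI","PHILADELPHIA","Phil","Phi.","Phil."],
  ["PIT","PITTSBURGH","Pitt","Pitt."],
  ["ARI","ARIZONA","Phoenix","Pho.","ari.","ariz","Ariz."],
  ["LAC","L.A. CHARGERS","L A CHARGERS","LAC","LA-C","LA Chargers","L A Chargers"],
  ["SF","S. FRANCISCO","S.F."],
  ["SEA","SEATTLE","Sea."],
  ["TB","TAMPA BAY","T.B."],
  ["WAS","WASHINGTON","Wash","Wash."],
  ["CAR","CAROLINA","car."],
  ["JAC","JACKSONVILLE","Jac","Jax"],
  ["CLE","CLEVELAND","Clev.","Clev","Clv"],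
  ["HOU","HOUSTON","Hou","Hou."],
  ["All","NFL/","NFL","NFL/Avg"],
  ["BYE","BYE","Bye","Bye."]]

-- A's for-loop over `names` with an `index` counter, first matching row wins
def nameToNumLoop (name : String) : List (List String) → Int → Int
  | [], _ => -1
  | row :: rest, index =>
    let index := index + 1
    if PySem.Str.upper name ∈ row.map PySem.Str.upper then
      (if index = 34 then 0 else index)
    else nameToNumLoop name rest index

def name_to_num (name : String) : Int := nameToNumLoop name namesTable 0

-- ===== PORT B =====
-- the module-level flat dict `_TEAM_NUM` of Source B (alias already uppercased -> team number;
-- keys are distinct, so first-match association lookup is exact dict semantics)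
def teamNumPairs : List (String × Int) := [
  ("ATL", 1), ("ATLANTA", 1), ("ATL.", 1), ("IND", 2), ("INDIANAPOLIS", 2), ("IND.", 2),
  ("BUF", 3), ("BUFFALO", 3), ("BUFF", 3), ("BUFF.", 3), ("CHI", 4), ("CHICAGO", 4),
  ("CHI.", 4), ("CIN", 5), ("CINCINNATI", 5), ("CIN.", 5), ("BAL", 6), ("BALTIMORE", 6),
  ("BALT", 6), ("BALT.", 6), ("DAL", 7), ("DALLAS", 7), ("DALL", 7), ("DAL.", 7), ("DEN", 8),
  ("DENVER", 8), ("DENV", 8), ("DEN.", 8), ("DENV.", 8), ("DET", 9), ("DETROIT", 9),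
  ("DET.", 9), ("GB", 10), ("GREEN BAY", 10), ("G.B.", 10), ("TEN", 11), ("TENNESSEE", 11),
  ("TENN.", 11), ("KC", 12), ("KANSAS CITY", 12), ("K.C.", 12), ("LAR", 13),
  ("L. A. RAMS", 13), ("L.A.", 13), ("LA-R", 13), ("RAM", 13), ("MIA", 14), ("MIAMI", 14),
  ("MIA.", 14), ("MIN", 15), ("MINNESOTA", 15), ("MINN", 15), ("MINN.", 15), ("NE", 16),
  ("NEW ENGLAND", 16), ("NEW ENGL", 16), ("N.E.", 16), ("NO", 17), ("NEW ORLEANS", 17),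
  ("N.O.", 17), ("NYG", 18), ("N.Y. GIANTS", 18), ("NY-G", 18), ("NEW YORK GIANTS", 18),
  ("NYJ", 19), ("N.Y. JETS", 19), ("NY-J", 19), ("NEW YORK JETS", 19), ("LVR", 20),
  ("LAS VEGAS", 20), ("RAIDERS", 20), ("RAI.", 20), ("OAK.", 20), ("PHI", 21),
  ("PHILADELPHIA", 21), ("PHIL", 21), ("PHI.", 21), ("PHIL.", 21), ("PIT", 22),
  ("PITTSBURGH", 22), ("PITT", 22), ("PITT.", 22), ("ARI", 23), ("ARIZONA", 23),
  ("PHOENIX", 23), ("PHO.", 23), ("ARI.", 23), ("ARIZ", 23), ("ARIZ.", 23), ("LAC", 24),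
  ("L.A. CHARGERS", 24), ("L A CHARGERS", 24), ("LA-C", 24), ("LA CHARGERS", 24), ("SF", 25),
  ("S. FRANCISCO", 25), ("S.F.", 25), ("SEA", 26), ("SEATTLE", 26), ("SEA.", 26), ("TB", 27),
  ("TAMPA BAY", 27), ("T.B.", 27), ("WAS", 28), ("WASHINGTON", 28), ("WASH", 28),
  ("WASH.", 28), ("CAR", 29), ("CAROLINA", 29), ("CAR.", 29), ("JAC", 30),
  ("JACKSONVILLE", 30), ("JAX", 30), ("CLE", 31), ("CLEVELAND", 31), ("CLEV.", 31),
  ("CLEV", 31), ("CLV", 31), ("HOU", 32), ("HOUSTON", 32), ("HOU.", 32), ("ALL", 33),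
  ("NFL/", 33), ("NFL", 33), ("NFL/AVG", 33), ("BYE", 0), ("BYE.", 0)]

-- dict .get with default -1 (first match; exact since the keys above are distinct)
def dictGetD : List (String × Int) → String → Int
  | [], _ => -1
  | (k, v) :: rest, u => if k = u then v else dictGetD rest u

def name_to_num_alt (name : String) : Int := dictGetD teamNumPairs (PySem.Str.upper name)

-- ===== PRECONDITION & SPEC =====
def Spec_name_to_num (name : String) (out : Int) : Prop := out = name_to_num_alt name
instance (name : String) (out : Int) : Decidable (Spec_name_to_num name out) := by unfold Spec_name_to_num; infer_instance

-- ===== CLAIM =====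
def Claim_equal_name_to_num : Prop := ∀ (name : String), Dom_name_to_num name → Spec_name_to_num name (name_to_num name)

-- ===== LEMMAS AND PROOFS =====

-- flatten the nested table into (uppercased alias, number) pairs, numbering rows from i+1,
-- row 34 numbered 0 (duplicates retained)
def flatPairs : List (List String) → Int → List (String × Int)
  | [], _ => []
  | row :: rest, i =>
    row.map (fun n => (PySem.Str.upper n, if i + 1 = 34 then 0 else i + 1)) ++ flatPairs rest (i + 1)

-- drop pairs whose key already occurred (keep the first occurrence)
def dedupFirst (seen : List String) : List (String × Int) → List (String × Int)
  | [] => []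
  | (k, v) :: rest =>
    if k ∈ seen then dedupFirst seen rest else (k, v) :: dedupFirst (k :: seen) rest

theorem dictGetD_append_row (name : String) (row : List String) (num : Int)
    (tail : List (String × Int)) :
    dictGetD (row.map (fun n => (PySem.Str.upper n, num)) ++ tail) (PySem.Str.upper name) =
      if PySem.Str.upper name ∈ row.map PySem.Str.upper then num
      else dictGetD tail (PySem.Str.upper name) := by
  induction row with
  | nil => simp
  | cons n rest ih =>
    by_cases h : PySem.Str.upper n = PySem.Str.upper name
    · simp [dictGetD, h]
    · simp [dictGetD, h, ih, Ne.symm h]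

theorem loop_eq_flat (name : String) (ls : List (List String)) (i : Int) :
    nameToNumLoop name ls i = dictGetD (flatPairs ls i) (PySem.Str.upper name) := by
  induction ls generalizing i with
  | nil => simp [nameToNumLoop, flatPairs, dictGetD]
  | cons row rest ih =>
    show (if PySem.Str.upper name ∈ row.map PySem.Str.upper then
            (if i + 1 = 34 then 0 else i + 1) else nameToNumLoop name rest (i + 1)) = _
    rw [show flatPairs (row :: rest) i =
        row.map (fun n => (PySem.Str.upper n, if i + 1 = 34 then 0 else i + 1)) ++
          flatPairs rest (i + 1) from rfl,
      dictGetD_append_row]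
    by_cases h : PySem.Str.upper name ∈ row.map PySem.Str.upper
    · simp [h]
    · simp [h, ih (i + 1)]

theorem dictGetD_dedupFirst (seen : List String) (L : List (String × Int)) (u : String)
    (hu : u ∉ seen) : dictGetD (dedupFirst seen L) u = dictGetD L u := by
  induction L generalizing seen with
  | nil => rfl
  | cons p rest ih =>
    obtain ⟨k, v⟩ := p
    by_cases hk : k ∈ seen
    · have hne : k ≠ u := fun h => hu (h ▸ hk)
      simp [dedupFirst, hk, dictGetD, hne, ih seen hu]
    · by_cases hku : k = u
      · simp [dedupFirst, hku, hu, dictGetD]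
      · have : u ∉ k :: seen := by simp [hu, Ne.symm hku]
        simp [dedupFirst, hk, dictGetD, hku, ih _ this]

set_option maxRecDepth 100000 in
theorem teamNumPairs_eq : teamNumPairs = dedupFirst [] (flatPairs namesTable 0) := by decide

-- ===== VERDICT =====
theorem name_to_num_spec : Claim_equal_name_to_num := by
  intro name _
  unfold Spec_name_to_num name_to_num name_to_num_alt
  rw [loop_eq_flat, teamNumPairs_eq,
    dictGetD_dedupFirst [] _ (PySem.Str.upper name) (by simp)]
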